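-- pv_equiv track=rewrite | github.com/pypi-data/pypi-mirror-371 | packages/urarovite/urarovite-1.3.1.tar.gz/urarovite-1.3.1/urarovite/utils/a1_range_validator.py | _find_matching_tabs
-- ===== SOURCE A (Python) =====
-- from typing import List, Dict, Any, Tuple, Union
--
-- def _find_matching_tabs(potential_tab: str, available_tabs: List[str]) -> List[str]:
--     """Find tabs where the potential_tab matches available tab names.
--
--     Priority order:
--     0. Exact match (case sensitive) - highest priority, no change needed
--     1. Case insensitive match - exact match ignoring case
--     2. Truncated match - potential_tab is shorter than available tab (should expand)
--     3. Shorter match - potential_tab is longer than available tab (should shorten)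
--
--     Args:
--         potential_tab: The tab name from the verification range
--         available_tabs: List of available tab names from input/output sheets
--
--     Returns:
--         List of matching tab names in priority order, or empty list if exact match found
--     """
--     if not potential_tab or not available_tabs:
--         return []
--
--     potential_lower = potential_tab.lower().strip()
--     potential_original = potential_tab.strip()
--
--     # Priority 0: Exact match (case sensitive) - highest priority
--     for tab in available_tabs:
--         if potential_original == tab:
--             return []  # Exact match found, no change needed
--
--     # Priority 1: Case insensitive match
--     case_insensitive_matches = []
--     for tab in available_tabs:
--         if potential_lower == tab.lower().strip():
--             case_insensitive_matches.append(tab)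
--
--     if case_insensitive_matches:
--         # Return the first case-insensitive match (prefer original case if available)
--         for match in case_insensitive_matches:
--             if match == potential_original:
--                 return []  # Found exact case-insensitive match, no change needed
--         return [case_insensitive_matches[0]]  # Return first case-insensitive match
--
--     # Priority 2: Truncated match (potential_tab is shorter than available tab)
--     truncated_matches = []
--     for tab in available_tabs:
--         tab_lower = tab.lower().strip()
--         # Check if this available tab starts with the potential tab (for expanding)
--         if tab_lower.startswith(potential_lower) and potential_lower != tab_lower:
--             truncated_matches.append(tab)
--
--     # Priority 3: Shorter match (potential_tab is longer than available tab)
--     shorter_matches = []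
--     for tab in available_tabs:
--         tab_lower = tab.lower().strip()
--         # Check if the potential tab starts with this available tab (for shortening)
--         if potential_lower.startswith(tab_lower) and potential_lower != tab_lower:
--             shorter_matches.append(tab)
--
--     # Combine and sort by priority: truncated first (expansion), then shorter (shortening)
--     all_matches = truncated_matches + shorter_matches
--
--     # Sort matches by length (longest first for truncated, shortest first for shorter)
--     # This ensures we get the most specific match for each type
--     truncated_matches.sort(key=len, reverse=True)  # Longest first for expansion
--     shorter_matches.sort(key=len)  # Shortest first for shortening
--
--     # Return in priority order: truncated (expansion) first, then shorter (shortening)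
--     return truncated_matches + shorter_matches
-- ===== SOURCE B (Python) =====
-- def _find_matching_tabs(potential_tab, available_tabs):
--     """Single pass over available_tabs classifying each tab once, then one
--     priority resolution step (same results as the multi-scan version)."""
--     if not potential_tab or not available_tabs:
--         return []
--
--     pl = potential_tab.lower().strip()
--     po = potential_tab.strip()
--
--     exact = False
--     ci, truncated, shorter = [], [], []
--     for tab in available_tabs:
--         tl = tab.lower().strip()
--         if po == tab:
--             exact = True
--         if pl == tl:
--             ci.append(tab)
--         elif tl.startswith(pl):
--             truncated.append(tab)
--         elif pl.startswith(tl):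
--             shorter.append(tab)
--
--     if exact:
--         return []
--     if ci:
--         return [ci[0]]
--     return sorted(truncated, key=len, reverse=True) + sorted(shorter, key=len)
-- ===== Notes on version B (the rewrite author's own statement) =====
-- stated objective: alternative
-- what changed: Replaces A's five separate scans over available_tabs (exact, case-insensitive, dead re-scan of ci matches, truncated, shorter) with one classifying pass that buckets each tab once, followed by a single priority-resolution step.
import Mathlib
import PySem

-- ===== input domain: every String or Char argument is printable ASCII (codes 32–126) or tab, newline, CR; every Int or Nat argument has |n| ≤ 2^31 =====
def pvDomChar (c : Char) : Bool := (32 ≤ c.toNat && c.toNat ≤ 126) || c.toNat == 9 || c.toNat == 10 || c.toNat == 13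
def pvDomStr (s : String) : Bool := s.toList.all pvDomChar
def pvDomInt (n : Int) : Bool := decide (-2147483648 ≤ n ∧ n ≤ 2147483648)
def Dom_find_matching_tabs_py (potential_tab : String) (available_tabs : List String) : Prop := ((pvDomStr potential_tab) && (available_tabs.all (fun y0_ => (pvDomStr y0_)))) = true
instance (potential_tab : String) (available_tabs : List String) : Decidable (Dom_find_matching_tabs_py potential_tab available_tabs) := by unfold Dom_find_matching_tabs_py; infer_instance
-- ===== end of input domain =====

-- B replaces A's five separate scans over available_tabs with one classifying pass
-- plus a single priority-resolution step (objective: alternative decomposition).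

-- ===== PORT A =====
def find_matching_tabs_py (potential_tab : String) (available_tabs : List String) : List String :=
  if potential_tab = "" ∨ available_tabs = [] then []
  else
    let potential_lower := PySem.Str.strip (PySem.Str.lower potential_tab)
    let potential_original := PySem.Str.strip potential_tab
    -- Priority 0: 'for tab: if potential_original == tab: return []' as an early-return scan
    if available_tabs.any (fun tab => potential_original == tab) then []
    else
      -- Priority 1: accumulation loop = filter
      let case_insensitive_matches := available_tabs.filter
        (fun tab => potential_lower == PySem.Str.strip (PySem.Str.lower tab))
      if case_insensitive_matches ≠ [] then
        if case_insensitive_matches.any (fun m => m == potential_original) then []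
        else case_insensitive_matches.take 1   -- [case_insensitive_matches[0]]
      else
        let truncated_matches := available_tabs.filter (fun tab =>
          let tab_lower := PySem.Str.strip (PySem.Str.lower tab)
          PySem.Str.startswith tab_lower potential_lower && potential_lower != tab_lower)
        let shorter_matches := available_tabs.filter (fun tab =>
          let tab_lower := PySem.Str.strip (PySem.Str.lower tab)
          PySem.Str.startswith potential_lower tab_lower && potential_lower != tab_lower)
        PySem.List.sorted truncated_matches (fun s => PySem.Str.len s) true
          ++ PySem.List.sorted shorter_matches (fun s => PySem.Str.len s) false

-- ===== PORT B =====
-- one classifying pass: state = (exact flag, ci bucket, truncated bucket, shorter bucket)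
def fmtAltStep (potential_original potential_lower : String)
    (acc : Bool × List String × List String × List String) (tab : String) :
    Bool × List String × List String × List String :=
  let tl := PySem.Str.strip (PySem.Str.lower tab)
  let ex := acc.1 || (potential_original == tab)
  if potential_lower == tl then (ex, acc.2.1 ++ [tab], acc.2.2.1, acc.2.2.2)
  else if PySem.Str.startswith tl potential_lower then (ex, acc.2.1, acc.2.2.1 ++ [tab], acc.2.2.2)
  else if PySem.Str.startswith potential_lower tl then (ex, acc.2.1, acc.2.2.1, acc.2.2.2 ++ [tab])
  else (ex, acc.2.1, acc.2.2.1, acc.2.2.2)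

def find_matching_tabs_py_alt (potential_tab : String) (available_tabs : List String) : List String :=
  if potential_tab = "" ∨ available_tabs = [] then []
  else
    let pl := PySem.Str.strip (PySem.Str.lower potential_tab)
    let po := PySem.Str.strip potential_tab
    let st := available_tabs.foldl (fmtAltStep po pl) (false, [], [], [])
    if st.1 then []
    else
      match st.2.1 with
      | c :: _ => [c]
      | [] =>
        PySem.List.sorted st.2.2.1 (fun s => PySem.Str.len s) true
          ++ PySem.List.sorted st.2.2.2 (fun s => PySem.Str.len s) false

-- ===== PRECONDITION & SPEC =====
def Spec_find_matching_tabs_py (potential_tab : String) (available_tabs : List String) (out : List String) : Prop := out = find_matching_tabs_py_alt potential_tab available_tabs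
instance (potential_tab : String) (available_tabs : List String) (out : List String) : Decidable (Spec_find_matching_tabs_py potential_tab available_tabs out) := by unfold Spec_find_matching_tabs_py; infer_instance

-- ===== CLAIM (what is proved, stated in full; the proofs are below) =====
def Claim_equal_find_matching_tabs_py : Prop := ∀ (potential_tab : String) (available_tabs : List String), Dom_find_matching_tabs_py potential_tab available_tabs → Spec_find_matching_tabs_py potential_tab available_tabs (find_matching_tabs_py potential_tab available_tabs)

-- ===== LEMMAS AND PROOFS =====

-- the single fold computes the exact-match flag and the three filters at once
theorem fmtAlt_foldl_spec (po pl : String) (tabs : List String)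
    (ex : Bool) (ci tr sh : List String) :
    tabs.foldl (fmtAltStep po pl) (ex, ci, tr, sh) =
      (ex || tabs.any (fun tab => po == tab),
       ci ++ tabs.filter (fun tab => pl == PySem.Str.strip (PySem.Str.lower tab)),
       tr ++ tabs.filter (fun tab =>
         !(pl == PySem.Str.strip (PySem.Str.lower tab)) &&
           PySem.Str.startswith (PySem.Str.strip (PySem.Str.lower tab)) pl),
       sh ++ tabs.filter (fun tab =>
         !(pl == PySem.Str.strip (PySem.Str.lower tab)) &&
           !(PySem.Str.startswith (PySem.Str.strip (PySem.Str.lower tab)) pl) &&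
             PySem.Str.startswith pl (PySem.Str.strip (PySem.Str.lower tab)))) := by
  induction tabs generalizing ex ci tr sh with
  | nil => simp
  | cons t ts ih =>
    rw [List.foldl_cons]
    cases h1 : (pl == PySem.Str.strip (PySem.Str.lower t)) with
    | true =>
      have hs : fmtAltStep po pl (ex, ci, tr, sh) t
          = (ex || (po == t), ci ++ [t], tr, sh) := by
        simp [fmtAltStep, h1]
      rw [hs, ih]
      simp [h1, Bool.or_assoc]
    | false =>
      cases h2 : PySem.Str.startswith (PySem.Str.strip (PySem.Str.lower t)) pl with
      | true =>
        have h2c := h2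
        simp at h2c
        have hs : fmtAltStep po pl (ex, ci, tr, sh) t
            = (ex || (po == t), ci, tr ++ [t], sh) := by
          simp [fmtAltStep, h1, h2c]
        rw [hs, ih]
        simp [h1, h2c, Bool.or_assoc]
      | false =>
        have h2c := h2
        simp at h2c
        cases h3 : PySem.Str.startswith pl (PySem.Str.strip (PySem.Str.lower t)) with
        | true =>
          have h3c := h3
          simp at h3c
          have hs : fmtAltStep po pl (ex, ci, tr, sh) t
              = (ex || (po == t), ci, tr, sh ++ [t]) := by
            simp [fmtAltStep, h1, h2c, h3c]
          rw [hs, ih]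
          simp [h1, h2c, h3c, Bool.or_assoc]
        | false =>
          have h3c := h3
          simp at h3c
          have hs : fmtAltStep po pl (ex, ci, tr, sh) t
              = (ex || (po == t), ci, tr, sh) := by
            simp [fmtAltStep, h1, h2c, h3c]
          rw [hs, ih]
          simp [h1, h2c, h3c, Bool.or_assoc]

-- mutual prefixes are equal (via PySem.Chars.startswith_iff and prefix antisymmetry)
theorem startswith_antisymm (a b : String)
    (h1 : PySem.Str.startswith a b = true) (h2 : PySem.Str.startswith b a = true) : a = b := by
  rw [PySem.Str.startswith_eq] at h1 h2
  have h1' : b.toList <+: a.toList := (PySem.Chars.startswith_iff _ _).mp h1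
  have h2' : a.toList <+: b.toList := (PySem.Chars.startswith_iff _ _).mp h2
  exact String.toList_inj.mp (h2'.eq_of_length_le (List.IsPrefix.length_le h1'))

-- B's truncated predicate coincides with A's
theorem trunc_pred_eq (pl tl : String) :
    (!(pl == tl) && PySem.Str.startswith tl pl)
      = (PySem.Str.startswith tl pl && pl != tl) := by
  simp only [bne]
  rw [Bool.and_comm]

-- B's shorter predicate coincides with A's (a mutual prefix would force pl = tl)
theorem shorter_pred_eq (pl tl : String) :
    (!(pl == tl) && !(PySem.Str.startswith tl pl) && PySem.Str.startswith pl tl)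
      = (PySem.Str.startswith pl tl && pl != tl) := by
  by_cases h : pl = tl
  · subst h; simp
  · have h' : (pl == tl) = false := by simp [h]
    cases hb : PySem.Str.startswith tl pl with
    | false =>
      simp only [bne, h']
      rw [Bool.and_comm]
      rfl
    | true =>
      cases hc : PySem.Str.startswith pl tl with
      | false => simp only [bne, h']; rfl
      | true => exact absurd (startswith_antisymm tl pl hb hc) (fun e => h e.symm)

theorem trunc_filter_eq (pl : String) (tabs : List String) :
    tabs.filter (fun tab =>
        !(pl == PySem.Str.strip (PySem.Str.lower tab)) &&
          PySem.Str.startswith (PySem.Str.strip (PySem.Str.lower tab)) pl)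
      = tabs.filter (fun tab =>
          PySem.Str.startswith (PySem.Str.strip (PySem.Str.lower tab)) pl &&
            pl != PySem.Str.strip (PySem.Str.lower tab)) :=
  List.filter_congr (fun _ _ => trunc_pred_eq pl _)

theorem shorter_filter_eq (pl : String) (tabs : List String) :
    tabs.filter (fun tab =>
        !(pl == PySem.Str.strip (PySem.Str.lower tab)) &&
          !(PySem.Str.startswith (PySem.Str.strip (PySem.Str.lower tab)) pl) &&
            PySem.Str.startswith pl (PySem.Str.strip (PySem.Str.lower tab)))
      = tabs.filter (fun tab =>
          PySem.Str.startswith pl (PySem.Str.strip (PySem.Str.lower tab)) &&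
            pl != PySem.Str.strip (PySem.Str.lower tab)) :=
  List.filter_congr (fun _ _ => shorter_pred_eq pl _)

-- no case-insensitive match can equal potential_original when no tab does
theorem ci_any_false (po pl : String) (tabs : List String)
    (h : tabs.any (fun tab => po == tab) = false) :
    (tabs.filter (fun tab => pl == PySem.Str.strip (PySem.Str.lower tab))).any
      (fun m => m == po) = false := by
  rw [List.any_eq_false] at h ⊢
  intro m hm
  have := h m (List.mem_of_mem_filter hm)
  simp at this ⊢
  exact fun e => this e.symm

-- ===== VERDICT (by name: the statement is the Claim_ definition above) =====
theorem find_matching_tabs_py_spec : Claim_equal_find_matching_tabs_py := by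
  intro pt tabs _hdom
  unfold Spec_find_matching_tabs_py find_matching_tabs_py find_matching_tabs_py_alt
  by_cases hguard : pt = "" ∨ tabs = []
  · rw [if_pos hguard, if_pos hguard]
  · rw [if_neg hguard, if_neg hguard]
    simp only [fmtAlt_foldl_spec, Bool.false_or, List.nil_append]
    cases hex : tabs.any (fun tab => PySem.Str.strip pt == tab) with
    | true => rw [if_pos rfl, if_pos rfl]
    | false =>
      rw [if_neg Bool.false_ne_true, if_neg Bool.false_ne_true]
      have hci := ci_any_false (PySem.Str.strip pt) (PySem.Str.strip (PySem.Str.lower pt)) tabs hex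
      cases hcil : tabs.filter (fun tab =>
          PySem.Str.strip (PySem.Str.lower pt) == PySem.Str.strip (PySem.Str.lower tab)) with
      | nil =>
        rw [if_neg (by simp)]
        rw [trunc_filter_eq, shorter_filter_eq]
      | cons c cs =>
        rw [hcil] at hci
        rw [if_pos (by simp), if_neg (by rw [hci]; exact Bool.false_ne_true)]
        rfl
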